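-- pv_equiv track=rewrite | github.com/zebra-f/Advent-of-Code-2022 | Day6/day6.py | part_one
-- ===== SOURCE A (Python) =====
-- def part_one(signal: str) -> int:
--     left = 0
--     right = 0
--     marker = set()
--     while len(marker) < 4 and right < len(signal):
--         while signal[right] in marker:
--             marker.remove(signal[left])
--             left += 1
--
--         marker.add(signal[right])
--         if len(marker) == 4:
--             return right + 1
--         right += 1
--
--     return 0
-- ===== SOURCE B (Python) =====
-- def part_one(sig: str) -> int:
--     for i in range(3, len(sig)):
--         if len(set(sig[i-3:i+1])) == 4:
--             return i + 1
--     return 0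
-- ===== Notes on version B (the rewrite author's own statement) =====
-- stated objective: simpler
-- what changed: Replaces the two-pointer sliding window with incremental set add/remove by a direct scan that tests each fixed 4-character window with a fresh set.
import Mathlib
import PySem

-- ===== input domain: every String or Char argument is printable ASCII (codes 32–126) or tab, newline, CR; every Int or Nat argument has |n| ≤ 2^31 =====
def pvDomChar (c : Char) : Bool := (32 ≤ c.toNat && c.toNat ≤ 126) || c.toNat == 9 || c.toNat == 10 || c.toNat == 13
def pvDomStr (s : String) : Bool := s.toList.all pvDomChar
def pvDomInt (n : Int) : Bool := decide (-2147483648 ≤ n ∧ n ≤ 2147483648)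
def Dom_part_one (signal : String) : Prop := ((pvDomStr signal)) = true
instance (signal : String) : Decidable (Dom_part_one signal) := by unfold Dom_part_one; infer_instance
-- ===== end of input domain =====

-- B replaces A's two-pointer sliding window (incremental set add/remove) by a direct scan
-- testing each fixed 4-character window with a fresh set; objective: simpler.

-- ===== PORT A =====
-- inner 'while signal[right] in marker' loop; fuel = marker.length bounds its iterations
-- (each pass removes one element, so the fuel is never exhausted before the condition fails;
-- Python's marker.remove(signal[left]) cannot raise: signal[left] is always in marker, so it
-- is ported as Set.discard)
def partOneInner (l : List Char) (c : Char) : Nat → Nat → PySem.Set Char → Nat × PySem.Set Char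
  | 0, left, marker => (left, marker)
  | fuel+1, left, marker =>
    if PySem.Set.contains marker c then
      partOneInner l c fuel (left+1) (PySem.Set.discard marker (PySem.List.pyGetD l (left:Int) ' '))
    else (left, marker)

-- outer 'while len(marker) < 4 and right < len(signal)' loop; fuel ≥ its iteration count
-- (right increases by 1 each pass, so fuel = len(signal)+1 is never exhausted)
def partOneOuter (l : List Char) : Nat → Nat → Nat → PySem.Set Char → Int
  | 0, _, _, _ => 0
  | fuel+1, left, right, marker =>
    if marker.length < 4 ∧ right < l.length then
      let c := PySem.List.pyGetD l (right:Int) ' '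
      let p := partOneInner l c marker.length left marker
      let marker' := PySem.Set.add p.2 c
      if marker'.length = 4 then (right:Int) + 1
      else partOneOuter l fuel p.1 (right+1) marker'
    else 0

def part_one (signal : String) : Int :=
  partOneOuter signal.toList (signal.toList.length + 1) 0 0 PySem.Set.empty

-- ===== PORT B =====
-- 'for i in range(3, len(signal)): if len(set(signal[i-3:i+1])) == 4: return i + 1' / 'return 0'
def partOneAltGo (l : List Char) (i : Nat) : Int :=
  if i < l.length then
    if (PySem.Set.ofList (PySem.List.slice l (some ((i:Int)-3)) (some ((i:Int)+1)))).length = 4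
    then (i:Int) + 1
    else partOneAltGo l (i+1)
  else 0
termination_by l.length - i

def part_one_alt (signal : String) : Int := partOneAltGo signal.toList 3

-- ===== PRECONDITION & SPEC =====
def Spec_part_one (signal : String) (out : Int) : Prop := out = part_one_alt signal
instance (signal : String) (out : Int) : Decidable (Spec_part_one signal out) := by unfold Spec_part_one; infer_instance

-- ===== CLAIM (what is proved, stated in full; the proofs are below) =====
def Claim_equal_part_one : Prop := ∀ (signal : String), Dom_part_one signal → Spec_part_one signal (part_one signal)

-- ===== LEMMAS AND PROOFS =====

-- the contiguous window signal[a:b] that A's marker set always holds, in order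
def subw (l : List Char) (a b : Nat) : List Char := (l.drop a).take (b - a)

lemma subw_self (l : List Char) (a : Nat) : subw l a a = [] := by simp [subw]

lemma subw_drop (l : List Char) (a a' b : Nat) (h : a ≤ a') :
    subw l a' b = (subw l a b).drop (a' - a) := by
  unfold subw
  rw [List.drop_take, List.drop_drop, show a + (a' - a) = a' from by omega,
    show b - a - (a' - a) = b - a' from by omega]

lemma nodup_subw_mono (l : List Char) (a a' b : Nat) (h : a ≤ a')
    (hnd : (subw l a b).Nodup) : (subw l a' b).Nodup := by
  rw [subw_drop l a a' b h]
  exact hnd.sublist (List.drop_sublist _ _)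

lemma length_subw (l : List Char) (a b : Nat) (hab : a ≤ b) (hb : b ≤ l.length) :
    (subw l a b).length = b - a := by
  simp [subw]; omega

lemma subw_cons (l : List Char) (a b : Nat) (hab : a < b) (hb : b ≤ l.length) :
    subw l a b = l.getD a ' ' :: subw l (a+1) b := by
  have ha : a < l.length := by omega
  unfold subw
  rw [List.drop_eq_getElem_cons ha, show b - a = (b-(a+1))+1 from by omega, List.take_succ_cons]
  simp [List.getD, List.getElem?_eq_getElem ha]

lemma subw_append (l : List Char) (a b : Nat) (hab : a ≤ b) (hb : b < l.length) :
    subw l a (b+1) = subw l a b ++ [l.getD b ' '] := by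
  have h1 : b + 1 - a = (b - a) + 1 := by omega
  have h2 : b - a < (l.drop a).length := by simp; omega
  simp [subw, h1, List.take_add_one, List.getElem?_drop, List.getD]
  have : a + (b - a) = b := by omega
  simp [this, List.getElem?_eq_getElem (by omega : b < l.length)]

-- len(set(w)) == len(w) exactly when w has no duplicates
lemma length_ofList_eq_iff (w : List Char) :
    (PySem.Set.ofList w).length = w.length ↔ w.Nodup := by
  constructor
  · intro h
    induction w with
    | nil => simp
    | cons x xs ih =>
      rw [PySem.Set.ofList_cons] at h
      simp only [List.length_cons] at h
      have h1 : (PySem.Set.discard (PySem.Set.ofList xs) x).length = xs.length := by omega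
      have h2 : (PySem.Set.discard (PySem.Set.ofList xs) x).length ≤ (PySem.Set.ofList xs).length :=
        List.length_filter_le _ _
      have h3 := PySem.Set.length_ofList_le xs
      have h4 : (PySem.Set.ofList xs).length = xs.length := by omega
      have hx : x ∉ xs := by
        intro hmem
        have : (PySem.Set.discard (PySem.Set.ofList xs) x).length < (PySem.Set.ofList xs).length := by
          apply List.length_filter_lt_length_iff_exists.mpr
          exact ⟨x, (PySem.Set.mem_ofList xs x).mpr hmem, by simp⟩
        omega
      exact List.Nodup.cons hx (ih h4)
  · intro h; rw [PySem.Set.ofList_eq_self_of_nodup w h]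

-- removing the head of a duplicate-free set leaves its tail (the only shape A's remove meets)
lemma discard_cons_self (x : Char) (s : List Char) (hx : x ∉ s) :
    PySem.Set.discard (x :: s) x = s := by
  simp only [PySem.Set.discard, List.filter_cons]
  simp only [beq_self_eq_true, Bool.not_true]
  rw [List.filter_eq_self.mpr]
  · simp
  · intro y hy
    have hne : y ≠ x := fun h => hx (h ▸ hy)
    simp [hne]

-- A's inner while loop: starting from the window [left, right), it ends at some window
-- [left', right) that no longer contains c, and the last removed character (if any) is c
lemma inner_spec (l : List Char) (c : Char) (fuel : Nat) :
    ∀ left right : Nat, left ≤ right → right ≤ l.length →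
    (subw l left right).Nodup → (subw l left right).length ≤ fuel →
    ∃ left', partOneInner l c fuel left (subw l left right) = (left', subw l left' right)
      ∧ left ≤ left' ∧ left' ≤ right ∧ c ∉ subw l left' right
      ∧ (left' = left ∨ l.getD (left'-1) ' ' = c) := by
  induction fuel with
  | zero =>
    intro left right h1 h2 hnd hf
    have hlen : (subw l left right).length = right - left := length_subw l left right h1 h2
    have hnil : subw l left right = [] := List.eq_nil_of_length_eq_zero (by omega)
    exact ⟨left, rfl, le_refl _, h1, by simp [hnil], Or.inl rfl⟩
  | succ fuel ih =>
    intro left right h1 h2 hnd hf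
    by_cases hc : c ∈ subw l left right
    · have hne : subw l left right ≠ [] := by intro h; rw [h] at hc; simp at hc
      have hlt : left < right := by
        rcases Nat.lt_or_ge left right with h | h
        · exact h
        · exfalso; apply hne
          have : left = right := by omega
          rw [this]; exact subw_self l right
      have hcons := subw_cons l left right hlt h2
      have hpg : PySem.List.pyGetD l (left:Int) ' ' = l.getD left ' ' := by
        simp [PySem.List.pyGetD_natCast]
      have hnd' : (subw l (left+1) right).Nodup := by
        rw [hcons] at hnd; exact hnd.of_cons
      have hhead : l.getD left ' ' ∉ subw l (left+1) right := by
        rw [hcons] at hnd; exact (List.nodup_cons.mp hnd).1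
      have hdisc : PySem.Set.discard (subw l left right) (l.getD left ' ') = subw l (left+1) right := by
        rw [hcons]; exact discard_cons_self _ _ hhead
      have hflen : (subw l (left+1) right).length ≤ fuel := by
        have e1 := length_subw l left right (by omega) h2
        have e2 := length_subw l (left+1) right (by omega) h2
        omega
      obtain ⟨left', heq, hl1, hl2, hnm, hlast⟩ := ih (left+1) right (by omega) h2 hnd' hflen
      refine ⟨left', ?_, by omega, hl2, hnm, ?_⟩
      · rw [partOneInner, if_pos (by rw [PySem.Set.contains_iff]; exact hc), hpg, hdisc]
        exact heq
      · rcases hlast with h | h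
        · right
          have he : l.getD (left' - 1) ' ' = l.getD left ' ' := by rw [h]; simp
          rw [he]
          rcases List.mem_cons.mp (by rw [hcons] at hc; exact hc) with hm | hm
          · exact hm.symm
          · exfalso; rw [h] at hnm; exact hnm hm
        · exact Or.inr h
    · refine ⟨left, ?_, le_refl _, h1, hc, Or.inl rfl⟩
      rw [partOneInner, if_neg]
      rw [PySem.Set.contains_iff]
      exact hc

lemma slice_window (l : List Char) (i : Nat) (h3 : 3 ≤ i) :
    PySem.List.slice l (some ((i:Int)-3)) (some ((i:Int)+1)) = subw l (i-3) (i+1) := by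
  have e1 : (i:Int) - 3 = ((i-3 : Nat) : Int) := by omega
  have e2 : (i:Int) + 1 = ((i+1 : Nat) : Int) := by omega
  rw [e1, e2, PySem.List.slice_natCast]
  rfl

-- B's test at index i is exactly "the 4-character window ending at i has no duplicates"
lemma altGo_cond (l : List Char) (i : Nat) (h3 : 3 ≤ i) (hi : i < l.length) :
    (PySem.Set.ofList (PySem.List.slice l (some ((i:Int)-3)) (some ((i:Int)+1)))).length = 4
      ↔ (subw l (i-3) (i+1)).Nodup := by
  rw [slice_window l i h3]
  have hw : (subw l (i-3) (i+1)).length = 4 := by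
    rw [length_subw l (i-3) (i+1) (by omega) (by omega)]; omega
  rw [← hw]
  exact length_ofList_eq_iff _

lemma altGo_end (l : List Char) (i : Nat) (hi : l.length ≤ i) : partOneAltGo l i = 0 := by
  rw [partOneAltGo, if_neg (by omega)]

lemma altGo_stop (l : List Char) (i : Nat) (h3 : 3 ≤ i) (hi : i < l.length)
    (hnod : (subw l (i-3) (i+1)).Nodup) : partOneAltGo l i = (i:Int) + 1 := by
  rw [partOneAltGo, if_pos hi, if_pos ((altGo_cond l i h3 hi).mpr hnod)]

lemma altGo_skip (l : List Char) (i : Nat) (h3 : 3 ≤ i) (hi : i < l.length)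
    (hnot : ¬ (subw l (i-3) (i+1)).Nodup) : partOneAltGo l i = partOneAltGo l (i+1) := by
  rw [partOneAltGo, if_pos hi, if_neg (fun h => hnot ((altGo_cond l i h3 hi).mp h))]

-- every window starting strictly before A's left pointer has a duplicate
lemma not_nodup_below (l : List Char) (left' e : Nat) (hl : 0 < left') (he : left' ≤ e)
    (he2 : e ≤ l.length) (hmem : l.getD (left'-1) ' ' ∈ subw l left' e) :
    ∀ k, k < left' → ¬ (subw l k e).Nodup := by
  intro k hk hnod
  have h1 : (subw l (left'-1) e).Nodup := nodup_subw_mono l k (left'-1) e (by omega) hnod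
  rw [subw_cons l (left'-1) e (by omega) he2] at h1
  have e' : left' - 1 + 1 = left' := by omega
  rw [e'] at h1
  exact (List.nodup_cons.mp h1).1 hmem

-- main invariant: from any reachable state of A's loop, A finishes like B's scan from max 3 right
lemma outer_eq (l : List Char) (fuel : Nat) :
    ∀ left right : Nat, ∀ marker : PySem.Set Char,
    l.length ≤ fuel + right →
    left ≤ right → right ≤ l.length → right - left ≤ 3 →
    marker = subw l left right →
    (subw l left right).Nodup →
    (left = 0 ∨ l.getD (left-1) ' ' ∈ subw l left right) →
    partOneOuter l fuel left right marker = partOneAltGo l (max 3 right) := by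
  induction fuel with
  | zero =>
    intro left right marker hfuel h1 h2 h3 hm hnd hmini
    rw [altGo_end l _ (by omega)]
    rfl
  | succ fuel ih =>
    intro left right marker hfuel h1 h2 h3 hm hnd hmini
    subst hm
    by_cases hr : right < l.length
    · have hmlen : (subw l left right).length = right - left := length_subw l left right h1 h2
      rw [partOneOuter, if_pos ⟨by omega, hr⟩]
      have hpg : PySem.List.pyGetD l (right:Int) ' ' = l.getD right ' ' := by
        simp [PySem.List.pyGetD_natCast]
      obtain ⟨left', heq, hl1, hl2, hnm, hlast⟩ :=
        inner_spec l (l.getD right ' ') (subw l left right).length left right h1 h2 hnd (le_refl _)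
      simp only [hpg, heq]
      have hadd : PySem.Set.add (subw l left' right) (l.getD right ' ') = subw l left' (right+1) := by
        rw [PySem.Set.add_of_not_mem hnm, subw_append l left' right hl2 hr]
      rw [hadd]
      have hnd2 : (subw l left' right).Nodup := nodup_subw_mono l left left' right hl1 hnd
      have hnd' : (subw l left' (right+1)).Nodup := by
        rw [subw_append l left' right hl2 hr]
        simp only [List.nodup_append, List.nodup_singleton]
        refine ⟨hnd2, trivial, ?_⟩
        intro a ha b hb
        rcases List.mem_singleton.mp hb with rfl
        exact fun h => hnm (h ▸ ha)
      have hlen' : (subw l left' (right+1)).length = right + 1 - left' :=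
        length_subw l left' (right+1) (by omega) (by omega)
      have hmini' : left' = 0 ∨ l.getD (left'-1) ' ' ∈ subw l left' (right+1) := by
        rcases hlast with h | h
        · subst h
          rcases hmini with h0 | hm0
          · exact Or.inl h0
          · right
            rw [subw_append l left' right hl2 hr]
            exact List.mem_append_left _ hm0
        · right
          rw [h, subw_append l left' right hl2 hr]
          exact List.mem_append_right _ (by simp)
      by_cases h4 : (subw l left' (right+1)).length = 4
      · rw [if_pos h4]
        have h4' : right + 1 - left' = 4 := by rw [← hlen']; exact h4
        have hr3 : 3 ≤ right := by omega
        rw [max_eq_right hr3, altGo_stop l right hr3 hr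
          (by rw [show right - 3 = left' from by omega]; exact hnd')]
      · rw [if_neg h4]
        have h4' : right + 1 - left' ≠ 4 := fun h => h4 (by rw [hlen', h])
        have hstep := ih left' (right+1) (subw l left' (right+1)) (by omega) (by omega)
          (by omega) (by omega) rfl hnd' hmini'
        rw [hstep]
        by_cases hr3 : 3 ≤ right
        · have hmem : l.getD (left'-1) ' ' ∈ subw l left' (right+1) := by
            rcases hmini' with h0 | hm0
            · omega
            · exact hm0
          have hnn : ¬ (subw l (right-3) (right+1)).Nodup :=
            not_nodup_below l left' (right+1) (by omega) (by omega) (by omega) hmem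
              (right-3) (by omega)
          rw [max_eq_right hr3, max_eq_right (by omega), altGo_skip l right hr3 hr hnn]
        · rw [max_eq_left (by omega), max_eq_left (by omega)]
    · rw [partOneOuter, if_neg (by omega), altGo_end l _ (by omega)]

-- ===== VERDICT (by name: the statement is the Claim_ definition above) =====
theorem part_one_spec : Claim_equal_part_one := by
  intro signal _
  unfold Spec_part_one part_one part_one_alt
  have h := outer_eq signal.toList (signal.toList.length + 1) 0 0 PySem.Set.empty
    (by omega) (by omega) (by omega) (by omega) (by rw [subw_self]; rfl)
    (by rw [subw_self]; exact List.nodup_nil) (Or.inl rfl)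
  simpa using h
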